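-- pv_equiv track=rewrite | github.com/spu-coder/my-ai-advisor | backend/security_middleware.py | sanitize_string
-- ===== SOURCE A (Python) =====
-- def sanitize_string(input_str: str, max_length: int = 1000) -> str:
--     """
--     Sanitize string input to prevent injection attacks.
--     / تنظيف إدخال النص لمنع هجمات الحقن.
--
--     Args:
--         input_str: Input string to sanitize
--         max_length: Maximum allowed length
--
--     Returns:
--         Sanitized string
--     """
--     if not isinstance(input_str, str):
--         raise ValueError("Input must be a string")
--
--     # Remove null bytes
--     input_str = input_str.replace('\x00', '')
--
--     # Limit length
--     if len(input_str) > max_length: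
--         input_str = input_str[:max_length]
--
--     # Remove potentially dangerous characters (basic)
--     # Note: This is basic sanitization. For production, use proper escaping
--     # ملاحظة: هذا تنظيف أساسي. للإنتاج، استخدم التهريب المناسب
--     dangerous_chars = ['<', '>', '"', "'", '&']
--     for char in dangerous_chars:
--         input_str = input_str.replace(char, '')
--
--     return input_str.strip()
-- ===== SOURCE B (Python) =====
-- def sanitize_string(input_str: str, max_length: int = 1000) -> str:
--     """Sanitize string input: one filtering pass instead of five replace scans."""
--     if not isinstance(input_str, str):
--         raise ValueError("Input must be a string")
--     cleaned = input_str.replace('\x00', '')[:max_length]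
--     dangerous = {'<', '>', '"', "'", '&'}
--     return ''.join(c for c in cleaned if c not in dangerous).strip()
-- ===== Notes on version B (the rewrite author's own statement) =====
-- stated objective: idiomatic
-- what changed: Replaces the conditional truncation plus five sequential single-character replace scans with one unconditional slice and a single membership-filtered pass over the string using a set of dangerous characters.
import Mathlib
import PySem

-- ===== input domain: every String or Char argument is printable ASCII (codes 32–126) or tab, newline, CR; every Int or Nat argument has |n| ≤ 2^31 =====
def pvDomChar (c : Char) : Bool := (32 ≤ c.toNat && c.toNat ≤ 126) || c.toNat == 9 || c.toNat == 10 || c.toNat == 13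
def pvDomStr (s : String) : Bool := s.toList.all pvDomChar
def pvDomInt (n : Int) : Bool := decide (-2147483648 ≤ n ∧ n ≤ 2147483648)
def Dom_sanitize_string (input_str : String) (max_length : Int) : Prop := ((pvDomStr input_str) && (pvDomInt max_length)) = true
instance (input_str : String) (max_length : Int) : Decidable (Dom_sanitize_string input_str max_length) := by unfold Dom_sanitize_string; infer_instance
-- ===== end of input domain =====

-- B replaces the conditional truncation plus five sequential replace scans with one slice
-- and a single set-membership-filtered pass (idiomatic; same return value everywhere).

-- ===== PORT A =====
def sanitize_string (input_str : String) (max_length : Int) : String :=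
  -- input_str = input_str.replace('\x00', '')
  let s0 := PySem.Str.replace input_str "\x00" ""
  -- if len(input_str) > max_length: input_str = input_str[:max_length]
  let s1 := if PySem.Str.len s0 > max_length then PySem.Str.slice s0 none (some max_length) else s0
  -- for char in dangerous_chars: input_str = input_str.replace(char, '')
  let s2 := ["<", ">", "\"", "'", "&"].foldl (fun acc ch => PySem.Str.replace acc ch "") s1
  -- return input_str.strip()
  PySem.Str.strip s2

-- ===== PORT B =====
def pvDangerous : PySem.Set Char := PySem.Set.ofList ['<', '>', '"', '\'', '&']

def sanitize_string_alt (input_str : String) (max_length : Int) : String :=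
  -- cleaned = input_str.replace('\x00', '')[:max_length]
  let cleaned := PySem.Str.slice (PySem.Str.replace input_str "\x00" "") none (some max_length)
  -- ''.join(c for c in cleaned if c not in dangerous).strip()
  PySem.Str.strip (String.ofList (cleaned.toList.filter (fun c => !(PySem.Set.contains pvDangerous c))))

-- ===== PRECONDITION & SPEC =====
def Spec_sanitize_string (input_str : String) (max_length : Int) (out : String) : Prop := out = sanitize_string_alt input_str max_length
instance (input_str : String) (max_length : Int) (out : String) : Decidable (Spec_sanitize_string input_str max_length out) := by unfold Spec_sanitize_string; infer_instance

-- ===== CLAIM (what is proved, stated in full; the proofs are below) =====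
def Claim_equal_sanitize_string : Prop := ∀ (input_str : String) (max_length : Int), Dom_sanitize_string input_str max_length → Spec_sanitize_string input_str max_length (sanitize_string input_str max_length)

-- ===== LEMMAS AND PROOFS =====

-- A single-character replace-by-empty is a filter.
theorem replace_go_single (ch : Char) (l acc : List Char) (fuel : Nat) (h : l.length ≤ fuel) :
    PySem.Chars.replace.go [ch] [] fuel l acc = acc.reverse ++ l.filter (fun c => !(c == ch)) := by
  induction l generalizing fuel acc with
  | nil => cases fuel <;> simp [PySem.Chars.replace.go]
  | cons c t ih =>
    cases fuel with
    | zero => simp at h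
    | succ f =>
      rw [PySem.Chars.replace.go]
      by_cases hc : c = ch
      · subst hc
        simp [List.isPrefixOf, ih acc f (by simpa using h)]
      · simp [List.isPrefixOf, hc, Ne.symm hc, ih (c :: acc) f (by simpa using h)]

theorem replace_single (ch : Char) (l : List Char) :
    PySem.Chars.replace l [ch] [] = l.filter (fun c => !(c == ch)) := by
  simpa [PySem.Chars.replace] using replace_go_single ch l [] l.length (le_refl _)

-- A's conditional truncation equals the unconditional slice.
theorem trunc_eq_slice (s : String) (m : Int) :
    (if PySem.Str.len s > m then PySem.Str.slice s none (some m) else s)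
      = PySem.Str.slice s none (some m) := by
  by_cases h : PySem.Str.len s > m
  · rw [if_pos h]
  · rw [if_neg h]
    rw [PySem.Str.len_eq] at h
    have hm : ((s.toList.length : Nat) : Int) ≤ m := by omega
    have hmn : m = ((m.toNat : Nat) : Int) := by omega
    rw [PySem.Str.slice, hmn, PySem.Chars.slice_eq_listSlice, PySem.List.slice_to_natCast]
    rw [List.take_of_length_le (by omega)]
    exact String.ofList_toList.symm

-- The five filters compose to B's set-membership filter.
theorem conj_eq_not_mem (c : Char) :
    (!(c == '&') && (!(c == '\'') && (!(c == '"') && (!(c == '>') && !(c == '<')))))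
      = !(PySem.Set.contains pvDangerous c) := by
  simp [pvDangerous, PySem.Set.contains, PySem.Set.ofList]
  cases h1 : c == '<' <;> cases h2 : c == '>' <;> cases h3 : c == '"' <;>
    cases h4 : c == '\'' <;> cases h5 : c == '&' <;> simp_all

-- ===== VERDICT (by name: the statement is the Claim_ definition above) =====
theorem sanitize_string_spec : Claim_equal_sanitize_string := by
  intro input_str max_length _
  simp only [Spec_sanitize_string, sanitize_string, sanitize_string_alt]
  simp only [trunc_eq_slice, List.foldl]
  refine congrArg PySem.Str.strip ?_
  simp only [PySem.Str.replace, String.toList_ofList,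
    show ("<" : String).toList = ['<'] from rfl, show (">" : String).toList = ['>'] from rfl,
    show ("\"" : String).toList = ['"'] from rfl, show ("'" : String).toList = ['\''] from rfl,
    show ("&" : String).toList = ['&'] from rfl, show ("" : String).toList = [] from rfl,
    replace_single, List.filter_filter]
  refine congrArg String.ofList ?_
  refine List.filter_congr (fun c _ => ?_)
  simpa using conj_eq_not_mem c
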